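-- pv_equiv track=rewrite | github.com/carrdelling/AdventOfCode2023 | day13/gold.py | find_mirrors
-- ===== SOURCE A (Python) =====
-- def find_mirrors(problem, factor):
--
--     score = 0
--
--     for jj in range(1, len(problem[0])):
--         mistakes = 1
--         is_mirror = True
--         for row in problem:
--             if not is_mirror:
--                 continue
--             mirror_row = zip(row[jj - 1::-1], row[jj::])
--             for x, xx in mirror_row:
--                 if x != xx and mistakes == 1:
--                     mistakes = 0
--                     continue
--                 if x != xx and mistakes == 0:
--                     is_mirror = False
--                     break
--         if is_mirror and mistakes == 0:
--             score += (jj * factor)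
--     return score
-- ===== SOURCE B (Python) =====
-- def find_mirrors(problem, factor):
--     # Column-major: transpose the grid into columns (None-padded for ragged rows),
--     # then for each candidate axis count all mismatched reflected column pairs.
--     m = len(problem[0])
--     maxlen = max(len(row) for row in problem)
--     cols = [[row[i] if i < len(row) else None for row in problem] for i in range(maxlen)]
--     score = 0
--     for jj in range(1, m):
--         total = 0
--         for d in range(min(jj, maxlen - jj)):
--             left, right = cols[jj - 1 - d], cols[jj + d]
--             total += sum(1 for x, y in zip(left, right) if y is not None and x != y)
--         if total == 1:
--             score += jj * factor
--     return score
-- ===== Notes on version B (the rewrite author's own statement) =====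
-- stated objective: alternative
-- what changed: B transposes the grid once into per-index columns (None-padded for ragged rows) and, for each axis, sums mismatch counts over reflected column pairs, replacing A's row-by-row (mistakes, is_mirror) state machine with early break.
import Mathlib
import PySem

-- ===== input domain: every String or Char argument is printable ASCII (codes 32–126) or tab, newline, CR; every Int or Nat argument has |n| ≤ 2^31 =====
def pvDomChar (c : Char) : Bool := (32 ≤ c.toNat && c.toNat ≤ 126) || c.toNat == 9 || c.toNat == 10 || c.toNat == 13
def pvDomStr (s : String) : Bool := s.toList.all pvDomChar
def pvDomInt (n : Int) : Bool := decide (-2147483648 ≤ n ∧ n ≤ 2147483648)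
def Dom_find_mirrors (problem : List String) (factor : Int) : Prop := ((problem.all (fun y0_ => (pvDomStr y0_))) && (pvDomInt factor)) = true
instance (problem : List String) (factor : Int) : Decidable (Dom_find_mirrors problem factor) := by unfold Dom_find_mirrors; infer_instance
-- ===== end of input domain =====

-- B re-implements A column-major: transpose once into per-index columns, then count all
-- mismatched reflected column pairs per axis (A scans row by row with an early-exit state machine).

-- ===== PORT A =====
-- the inner 'for x, xx in mirror_row' loop of A; returns the updated (mistakes, is_mirror)
def pvInnerA : List (Char × Char) → Int → Int × Bool
  | [], mistakes => (mistakes, true)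
  | (x, xx) :: rest, mistakes =>
    if x ≠ xx ∧ mistakes = 1 then pvInnerA rest 0
    else if x ≠ xx ∧ mistakes = 0 then (mistakes, false)
    else pvInnerA rest mistakes

def find_mirrors (problem : List String) (factor : Int) : Int :=
  -- problem[0]: Pre_ gives problem ≠ [], so headD's default is never used
  (PySem.List.pyRange 1 (PySem.Str.len (problem.headD "")) 1).foldl (fun score jj =>
    let st := problem.foldl (fun (st : Int × Bool) row =>
      if st.2 = false then st
      else
        -- row[jj-1::-1] = reverse of row[:jj] (exact for jj ≥ 1); row[jj::] = drop jj
        pvInnerA (((row.toList.take jj.toNat).reverse).zip (row.toList.drop jj.toNat)) st.1)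
      (1, true)
    if st.2 = true ∧ st.1 = 0 then score + jj * factor else score) 0

-- ===== PORT B =====
def find_mirrors_alt (problem : List String) (factor : Int) : Int :=
  let m := PySem.Str.len (problem.headD "")   -- len(problem[0]); Pre_ gives problem ≠ []
  -- max(len(row) for row in problem); nonempty under Pre_, so getD's default is never used
  let maxlen := (PySem.List.max? (problem.map (fun row => PySem.Str.len row)) (fun x => x)).getD 0
  -- cols[i][r] = problem[r][i] if i < len(problem[r]) else None
  let cols := (PySem.List.pyRange 0 maxlen 1).map (fun i =>
    problem.map (fun row => if i < PySem.Str.len row then PySem.Str.pyGet? row i else none))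
  (PySem.List.pyRange 1 m 1).foldl (fun score jj =>
    let total := (PySem.List.pyRange 0 (min jj (maxlen - jj)) 1).foldl (fun t d =>
      -- cols[jj-1-d], cols[jj+d]: both indices are provably in range, the default [] is never used
      let left := PySem.List.pyGetD cols (jj - 1 - d) []
      let right := PySem.List.pyGetD cols (jj + d) []
      t + (((left.zip right).countP (fun p => p.2.isSome && decide (p.1 ≠ p.2))) : Int)) 0
    if total = 1 then score + jj * factor else score) 0

-- ===== PRECONDITION & SPEC =====
-- Pre_ excludes only the empty list, on which A raises IndexError (problem[0]).
def Pre_find_mirrors (problem : List String) (factor : Int) : Prop := problem ≠ []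
instance (problem : List String) (factor : Int) : Decidable (Pre_find_mirrors problem factor) := by unfold Pre_find_mirrors; infer_instance
def pvWitness_find_mirrors : List String × Int := (["#.#", "..#"], 2)

def Spec_find_mirrors (problem : List String) (factor : Int) (out : Int) : Prop := out = find_mirrors_alt problem factor
instance (problem : List String) (factor : Int) (out : Int) : Decidable (Spec_find_mirrors problem factor out) := by unfold Spec_find_mirrors; infer_instance

-- ===== CLAIM (what is proved, stated in full; the proofs are below) =====
def Claim_equal_find_mirrors : Prop := ∀ (problem : List String) (factor : Int), Dom_find_mirrors problem factor → Pre_find_mirrors problem factor → Spec_find_mirrors problem factor (find_mirrors problem factor)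

-- ===== LEMMAS AND PROOFS =====

-- the (mistakes, is_mirror) state as a function of the number of mismatches seen so far
def pvStateOf : Nat → Int × Bool
  | 0 => (1, true)
  | 1 => (0, true)
  | _ + 2 => (0, false)

theorem pvStateOf_ge2 (T : Nat) (h : 2 ≤ T) : pvStateOf T = (0, false) := by
  match T, h with
  | n + 2, _ => rfl

theorem pvInnerA_zero (pairs : List (Char × Char)) :
    pvInnerA pairs 0 = pvStateOf (1 + pairs.countP (fun p => decide (p.1 ≠ p.2))) := by
  induction pairs with
  | nil => rfl
  | cons p rest ih =>
    obtain ⟨x, xx⟩ := p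
    by_cases h : x = xx
    · simpa [pvInnerA, h] using ih
    · have e : (1 + List.countP (fun p => decide (p.1 ≠ p.2)) ((x,xx)::rest)) = List.countP (fun p => decide (p.1 ≠ p.2)) rest + 2 := by
        simp [h]; omega
      rw [e, pvStateOf_ge2 _ (by omega)]
      simp [pvInnerA, h]

theorem pvInnerA_one (pairs : List (Char × Char)) :
    pvInnerA pairs 1 = pvStateOf (pairs.countP (fun p => decide (p.1 ≠ p.2))) := by
  induction pairs with
  | nil => rfl
  | cons p rest ih =>
    obtain ⟨x, xx⟩ := p
    by_cases h : x = xx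
    · simpa [pvInnerA, h] using ih
    · rw [show ((x, xx) :: rest).countP (fun p => decide (p.1 ≠ p.2)) = 1 + rest.countP (fun p => decide (p.1 ≠ p.2)) by simp [h]; omega]
      simpa [pvInnerA, h] using pvInnerA_zero rest

def pvCnt (j : Nat) (l : List Char) : Nat :=
  (((l.take j).reverse).zip (l.drop j)).countP (fun p => decide (p.1 ≠ p.2))

theorem pvFoldA (j : Nat) (rows : List String) (t : Nat) :
    rows.foldl (fun (st : Int × Bool) row =>
      if st.2 = false then st
      else pvInnerA (((row.toList.take j).reverse).zip (row.toList.drop j)) st.1) (pvStateOf t)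
    = pvStateOf (t + (rows.map (fun row => pvCnt j row.toList)).sum) := by
  induction rows generalizing t with
  | nil => simp
  | cons row rest ih =>
    simp only [List.foldl_cons, List.map_cons, List.sum_cons]
    match t with
    | 0 =>
      rw [show (if (pvStateOf 0).2 = false then pvStateOf 0 else pvInnerA (((row.toList.take j).reverse).zip (row.toList.drop j)) (pvStateOf 0).1) = pvInnerA (((row.toList.take j).reverse).zip (row.toList.drop j)) 1 from rfl]
      rw [pvInnerA_one, ← pvCnt]
      rw [ih]
      congr 1
      omega
    | 1 =>
      rw [show (if (pvStateOf 1).2 = false then pvStateOf 1 else pvInnerA (((row.toList.take j).reverse).zip (row.toList.drop j)) (pvStateOf 1).1) = pvInnerA (((row.toList.take j).reverse).zip (row.toList.drop j)) 0 from rfl]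
      rw [pvInnerA_zero, ← pvCnt]
      have := ih (1 + pvCnt j row.toList)
      rw [this]
      congr 1
      omega
    | n + 2 =>
      rw [show (if (pvStateOf (n + 2)).2 = false then pvStateOf (n + 2) else pvInnerA (((row.toList.take j).reverse).zip (row.toList.drop j)) (pvStateOf (n + 2)).1) = pvStateOf (n + 2) from rfl]
      rw [ih]
      rw [pvStateOf_ge2 _ (by omega), pvStateOf_ge2 _ (by omega)]

theorem pvStateOf_cond (T : Nat) :
    (((pvStateOf T).2 = true ∧ (pvStateOf T).1 = 0) ↔ T = 1) := by
  match T with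
  | 0 => simp [pvStateOf]
  | 1 => simp [pvStateOf]
  | n + 2 => simp [pvStateOf]

theorem pvZipMirror (j : Nat) (hj : 1 ≤ j) (l : List Char) :
    ((l.take j).reverse).zip (l.drop j)
    = (List.range (min j (l.length - j))).map (fun d => (l.getD (j - 1 - d) 'a', l.getD (j + d) 'a')) := by
  apply List.ext_getElem
  · simp
  · intro i h1 h2
    have hlen : i < min j (l.length - j) := by simpa using h2
    have hjl : j < l.length := by omega
    simp only [List.getElem_zip, List.getElem_map, List.getElem_range, List.getElem_reverse,
      List.getElem_take, List.getElem_drop]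
    have ht : (List.take j l).length = j := by simp [Nat.le_of_lt hjl]
    simp only [ht]
    rw [List.getD_eq_getElem l 'a' (by omega : j - 1 - i < l.length),
        List.getD_eq_getElem l 'a' (by omega : j + i < l.length)]

theorem pvCountP_range (n : Nat) (q : Nat → Bool) :
    (List.range n).countP q = ∑ d ∈ Finset.range n, (if q d then 1 else 0) := by
  induction n with
  | zero => simp
  | succ n ih => rw [List.range_succ, List.countP_append, Finset.sum_range_succ, ih]; simp

theorem pvCountP_sum {α : Type} (l : List α) (q : α → Bool) :
    l.countP q = (l.map (fun x => if q x then 1 else 0)).sum := by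
  induction l with
  | nil => simp
  | cons x t ih => simp [List.countP_cons, ih]; by_cases h : q x <;> simp [h] <;> omega

theorem pvSumRangeInt (n : Nat) (f : Nat → Int) :
    ((List.range n).map f).sum = ∑ d ∈ Finset.range n, f d := by
  induction n with
  | zero => simp
  | succ n ih => rw [List.range_succ, Finset.sum_range_succ, ← ih]; simp

theorem pvSumSwap {α : Type} (l : List α) (N : Nat) (f : α → Nat → Nat) :
    (l.map (fun x => ∑ d ∈ Finset.range N, f x d)).sum
    = ∑ d ∈ Finset.range N, (l.map (fun x => f x d)).sum := by
  induction l with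
  | nil => simp
  | cons x t ih => simp [ih, Finset.sum_add_distrib]

def pvInd (j d : Nat) (l : List Char) : Nat :=
  if (l[j + d]?).isSome ∧ ¬ (l[j - 1 - d]? = l[j + d]?) then 1 else 0

theorem pvCnt_eq (j N : Nat) (hj : 1 ≤ j) (hNj : N ≤ j) (l : List Char)
    (hN : min j (l.length - j) ≤ N) :
    pvCnt j l = ∑ d ∈ Finset.range N, pvInd j d l := by
  rw [pvCnt, pvZipMirror j hj, List.countP_map, pvCountP_range]
  calc (∑ d ∈ Finset.range (min j (l.length - j)),
          if ((fun p => decide (p.1 ≠ p.2)) ∘ fun d => (l.getD (j - 1 - d) 'a', l.getD (j + d) 'a')) d then 1 else 0)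
      = ∑ d ∈ Finset.range (min j (l.length - j)), pvInd j d l := by
        refine Finset.sum_congr rfl (fun d hd => ?_)
        have hdM : d < min j (l.length - j) := Finset.mem_range.mp hd
        have h1 : j + d < l.length := by omega
        have h2 : j - 1 - d < l.length := by omega
        simp only [Function.comp_apply, pvInd, List.getD_eq_getElem _ _ h2,
          List.getD_eq_getElem _ _ h1, List.getElem?_eq_getElem h1, List.getElem?_eq_getElem h2]
        by_cases h : l[j - 1 - d] = l[j + d] <;> simp [h]
    _ = ∑ d ∈ Finset.range N, pvInd j d l := by
        refine Finset.sum_subset ((by intro x hx; simp only [Finset.mem_range] at hx ⊢; omega : Finset.range (min j (l.length - j)) ⊆ Finset.range N)) (fun d hd hnd => ?_)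
        have : min j (l.length - j) ≤ d := by
          by_contra hc
          exact hnd (Finset.mem_range.mpr (by omega))
        have hln : l.length ≤ j + d := by
          have hdN : d < N := Finset.mem_range.mp hd
          omega
        simp [pvInd, List.getElem?_eq_none hln]

theorem pvColGet (row : String) (a : Int) (ha : 0 ≤ a) :
    (if a < PySem.Str.len row then PySem.Str.pyGet? row a else none) = row.toList[a.toNat]? := by
  by_cases hlt : a < PySem.Str.len row
  · rw [if_pos hlt]
    simp only [PySem.Str.pyGet?_eq, PySem.Chars.pyGet?_eq_listPyGet?]
    exact PySem.List.pyGet?_of_nonneg row.toList ha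
  · rw [if_neg hlt, eq_comm]
    rw [PySem.Str.len_eq] at hlt
    exact List.getElem?_eq_none (by omega)

theorem pvIndBool (j d : Nat) (l : List Char) :
    (if ((l[j + d]?).isSome && decide (l[j - 1 - d]? ≠ l[j + d]?)) = true then (1 : Nat) else 0)
    = pvInd j d l := by
  rw [pvInd]
  by_cases h1 : (l[j + d]?).isSome <;> by_cases h2 : l[j - 1 - d]? = l[j + d]? <;> simp [h1, h2]

-- ===== VERDICT (by name: the statement is the Claim_ definition above) =====
theorem pvBInner (rows : List String) (M jj : Int) (d jn : Nat)
    (ha1 : 0 ≤ jj - 1 - (d : Int)) (ha2 : jj - 1 - (d : Int) < M) (hb2 : jj + (d : Int) < M)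
    (e1 : (jj - 1 - (d : Int)).toNat = jn - 1 - d) (e2 : (jj + (d : Int)).toNat = jn + d) :
    List.countP (fun p => p.2.isSome && decide (p.1 ≠ p.2))
      ((PySem.List.pyGetD ((PySem.List.pyRange 0 M 1).map (fun i =>
          rows.map (fun row => if i < PySem.Str.len row then PySem.Str.pyGet? row i else none))) (jj - 1 - (d : Int)) []).zip
       (PySem.List.pyGetD ((PySem.List.pyRange 0 M 1).map (fun i =>
          rows.map (fun row => if i < PySem.Str.len row then PySem.Str.pyGet? row i else none))) (jj + (d : Int)) []))
    = (rows.map (fun row => pvInd jn d row.toList)).sum := by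
  rw [PySem.List.pyGetD_map_pyRange_of_nonneg _ M _ _ ha1 ha2,
      PySem.List.pyGetD_map_pyRange_of_nonneg _ M _ _ (by omega) hb2,
      List.zip_map', List.countP_map, pvCountP_sum]
  congr 1
  apply List.map_congr_left
  intro row _
  simp only [Function.comp_apply]
  simp only [pvColGet row (jj - 1 - (d : Int)) ha1, pvColGet row (jj + (d : Int)) (by omega : (0 : Int) ≤ jj + (d : Int)), e1, e2]
  exact pvIndBool jn d row.toList

theorem find_mirrors_spec : Claim_equal_find_mirrors := by
  intro problem factor _hdom hpre
  unfold Spec_find_mirrors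
  obtain ⟨hd, tl, rfl⟩ : ∃ hd tl, problem = hd :: tl := by
    cases problem with
    | nil => exact absurd rfl hpre
    | cons hd tl => exact ⟨hd, tl, rfl⟩
  unfold find_mirrors find_mirrors_alt
  simp only [List.headD_cons]
  set M : Int := (PySem.List.max? ((hd :: tl).map (fun row => PySem.Str.len row)) (fun x => x)).getD 0 with hM
  have hMfold : M = List.foldl max (PySem.Str.len hd) (tl.map (fun row => PySem.Str.len row)) := by
    rw [hM, List.map_cons, PySem.List.max?_id_cons, Option.getD_some]
  have hhd_le : PySem.Str.len hd ≤ M := hMfold ▸ (PySem.List.le_foldl_max _ _).1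
  have hall : ∀ r ∈ hd :: tl, PySem.Str.len r ≤ M := by
    intro r hr
    rcases List.mem_cons.mp hr with rfl | hrt
    · exact hhd_le
    · exact hMfold ▸ (PySem.List.le_foldl_max _ _).2 _ (List.mem_map_of_mem hrt)
  have hhd0 : (0 : Int) ≤ PySem.Str.len hd := by
    rw [PySem.Str.len_eq]; exact Int.natCast_nonneg _
  have hM0 : 0 ≤ M := le_trans hhd0 hhd_le
  refine PySem.List.foldl_congr_mem' _ _ _ _ ?_
  intro jj hjj score
  obtain ⟨hjj1, hjj2⟩ := PySem.List.mem_pyRange_one.mp hjj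
  have hjcast : ((jj.toNat : Int)) = jj := Int.toNat_of_nonneg (by omega)
  have hLcast : ((M.toNat : Int)) = M := Int.toNat_of_nonneg hM0
  set j := jj.toNat with hj
  set L := M.toNat with hL
  set N := min j (L - j) with hN
  have hrowlen : ∀ r ∈ hd :: tl, r.toList.length ≤ L := by
    intro r hr
    have := hall r hr
    rw [PySem.Str.len_eq] at this
    omega
  have hT : (0 + ((hd :: tl).map (fun row => pvCnt j row.toList)).sum)
      = ∑ d ∈ Finset.range N, ((hd :: tl).map (fun row => pvInd j d row.toList)).sum := by
    rw [Nat.zero_add,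
      List.map_congr_left (fun r hr => pvCnt_eq j N (by omega) (by omega) r.toList
        (by have := hrowlen r hr; omega)),
      pvSumSwap]
  rw [show ((1 : Int), true) = pvStateOf 0 from rfl, pvFoldA j (hd :: tl) 0, hT]
  rw [PySem.List.foldl_add, PySem.List.pyRange_zero (min jj (M - jj)), List.map_map, pvSumRangeInt]
  have hKN : (min jj (M - jj)).toNat = N := by omega
  rw [hKN]
  simp only [Function.comp_apply]
  rw [Finset.sum_congr rfl (fun d hdN => congrArg (Nat.cast : Nat → Int)
    (pvBInner (hd :: tl) M jj d j
      (by have := Finset.mem_range.mp hdN; omega)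
      (by have := Finset.mem_range.mp hdN; omega)
      (by have := Finset.mem_range.mp hdN; omega)
      (by have := Finset.mem_range.mp hdN; omega)
      (by have := Finset.mem_range.mp hdN; omega)))]
  rw [← Nat.cast_sum]
  apply if_congr _ rfl rfl
  rw [pvStateOf_cond]
  omega
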